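-- pv_equiv track=rewrite | github.com/hanshuebner/html-scrabble | tools/prompt-analysis/analyze.py | classify_prompt_heuristic
-- ===== SOURCE A (Python) =====
-- def classify_prompt_heuristic(content):
--     """Classify a prompt using keyword heuristics (fallback)."""
--     cl = content.lower()
--
--     # Correction - AI's previous output was wrong
--     for p in ['still not', 'still wrong', 'still too', 'still the same', 'still broken',
--               'made it worse', 'not satisfactory', 'not close enough', 'this made it worse',
--               'that broke', 'still shows', 'still appears', 'still has', 'still displays',
--               'unchanged', 'no change', 'no effect', 'no visible effect',
--               'that\'s wrong', 'that is wrong', 'that did not', 'that didn\'t',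
--               'not right', 'not correct']:
--         if p in cl:
--             return 'CORR'
--
--     # Process noise
--     for p in ['commit and push', 'commit, push', 'push and observe', 'wait for ci',
--               'this session is being continued', '<command-name>/clear',
--               '<command-name>/rate', '<local-command-stdout>']:
--         if p in cl:
--             return 'PROC'
--
--     # Questions
--     if cl.strip().endswith('?'):
--         return 'ASK'
--     for p in ['how can i', 'how do i', 'how does', 'what is', 'what are',
--               'what do we need', 'remind me how']:
--         if cl.startswith(p):
--             return 'ASK'
--
--     # Vision - high-level design
--     for p in ['implement the following plan', 'software architect', 'moderniz',
--               'restructure', 'the architecture', 'refactor', 'should be class']: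
--         if p in cl:
--             return 'VISION'
--
--     # Bug reports
--     for p in ['bug', 'broken', 'error', 'crash', 'cannot', 'can\'t',
--               'does not work', 'doesn\'t work']:
--         if p in cl:
--             return 'BUG'
--
--     # Refinement - tweaking working things
--     for p in ['slightly', 'a little', 'a bit', 'move it', 'shift', 'bigger',
--               'smaller', 'closer to', 'further', 'adjust']:
--         if p in cl:
--             return 'REFINE'
--
--     return 'FEAT'
-- ===== SOURCE B (Python) =====
-- _CORR = ['still not', 'still wrong', 'still too', 'still the same', 'still broken',
--          'made it worse', 'not satisfactory', 'not close enough', 'this made it worse',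
--          'that broke', 'still shows', 'still appears', 'still has', 'still displays',
--          'unchanged', 'no change', 'no effect', 'no visible effect',
--          'that\'s wrong', 'that is wrong', 'that did not', 'that didn\'t',
--          'not right', 'not correct']
-- _PROC = ['commit and push', 'commit, push', 'push and observe', 'wait for ci',
--          'this session is being continued', '<command-name>/clear',
--          '<command-name>/rate', '<local-command-stdout>']
-- _ASK = ['how can i', 'how do i', 'how does', 'what is', 'what are',
--         'what do we need', 'remind me how']
-- _VISION = ['implement the following plan', 'software architect', 'moderniz',
--            'restructure', 'the architecture', 'refactor', 'should be class']
-- _BUG = ['bug', 'broken', 'error', 'crash', 'cannot', 'can\'t',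
--         'does not work', 'doesn\'t work']
-- _REFINE = ['slightly', 'a little', 'a bit', 'move it', 'shift', 'bigger',
--            'smaller', 'closer to', 'further', 'adjust']
--
-- # substring-matched categories, each with its priority rank (lower wins);
-- # rank 2 (ASK) is not substring-based and is decided separately
-- _CONTAINS_CATS = [(0, tuple(_CORR)), (1, tuple(_PROC)), (3, tuple(_VISION)), (4, tuple(_BUG)), (5, tuple(_REFINE))]
-- _LABELS = ['CORR', 'PROC', 'ASK', 'VISION', 'BUG', 'REFINE', 'FEAT']
--
--
-- def classify_prompt_heuristic(content):
--     """Classify by one position-major scan: walk the text once and, at each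
--     position, lower the best (minimal) rank of any pattern starting there;
--     then decide ASK from the end/start tests, and return the best rank's label."""
--     cl = content.lower()
--     best = 6  # FEAT
--     for i in range(len(cl)):
--         for rank, pats in _CONTAINS_CATS:
--             if rank < best and cl.startswith(pats, i):
--                 best = rank
--     if best > 2 and (cl.strip().endswith('?') or any(cl.startswith(p) for p in _ASK)):
--         best = 2
--     return _LABELS[best]
-- ===== Notes on version B (the rewrite author's own statement) =====
-- stated objective: alternative
-- what changed: Replaced A's pattern-major early-return category loops by a position-major single scan of the text that keeps the best (minimal) matching category rank in an accumulator, decides ASK separately from the end/start tests, and indexes a label table by the final rank.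
import Mathlib
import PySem

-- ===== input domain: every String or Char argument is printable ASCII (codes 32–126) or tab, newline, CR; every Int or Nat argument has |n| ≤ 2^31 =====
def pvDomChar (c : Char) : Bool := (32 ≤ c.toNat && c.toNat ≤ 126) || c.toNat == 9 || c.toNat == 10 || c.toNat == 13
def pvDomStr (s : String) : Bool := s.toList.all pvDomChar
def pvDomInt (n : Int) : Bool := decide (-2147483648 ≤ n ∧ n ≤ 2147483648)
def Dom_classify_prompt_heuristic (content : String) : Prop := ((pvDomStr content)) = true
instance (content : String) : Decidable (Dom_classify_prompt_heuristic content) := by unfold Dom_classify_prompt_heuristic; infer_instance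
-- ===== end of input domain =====

-- B replaces A's pattern-major early-return category loops by a position-major single scan of
-- the text keeping the best (minimal) matching category rank; same cost class (alternative).


-- ===== PORT A =====
def pvCorrPats : List String := ["still not", "still wrong", "still too", "still the same", "still broken",
  "made it worse", "not satisfactory", "not close enough", "this made it worse",
  "that broke", "still shows", "still appears", "still has", "still displays",
  "unchanged", "no change", "no effect", "no visible effect",
  "that's wrong", "that is wrong", "that did not", "that didn't",
  "not right", "not correct"]
def pvProcPats : List String := ["commit and push", "commit, push", "push and observe", "wait for ci",
  "this session is being continued", "<command-name>/clear",
  "<command-name>/rate", "<local-command-stdout>"]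
def pvAskPats : List String := ["how can i", "how do i", "how does", "what is", "what are",
  "what do we need", "remind me how"]
def pvVisionPats : List String := ["implement the following plan", "software architect", "moderniz",
  "restructure", "the architecture", "refactor", "should be class"]
def pvBugPats : List String := ["bug", "broken", "error", "crash", "cannot", "can't",
  "does not work", "doesn't work"]
def pvRefinePats : List String := ["slightly", "a little", "a bit", "move it", "shift", "bigger",
  "smaller", "closer to", "further", "adjust"]

-- each 'for p in …: if p in cl: return L' loop of A = first-match scan over its pattern list
def pvAnyIn (cl : String) (ps : List String) : Bool := ps.any (fun p => PySem.Str.isIn p cl)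
def pvAnyStarts (cl : String) (ps : List String) : Bool := ps.any (fun p => PySem.Str.startswith cl p)

def classify_prompt_heuristic (content : String) : String :=
  let cl := PySem.Str.lower content
  if pvAnyIn cl pvCorrPats then "CORR"
  else if pvAnyIn cl pvProcPats then "PROC"
  else if PySem.Str.endswith (PySem.Str.strip cl) "?" then "ASK"
  else if pvAnyStarts cl pvAskPats then "ASK"
  else if pvAnyIn cl pvVisionPats then "VISION"
  else if pvAnyIn cl pvBugPats then "BUG"
  else if pvAnyIn cl pvRefinePats then "REFINE"
  else "FEAT"

-- ===== PORT B =====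
-- Source B's _CONTAINS_CATS table: substring categories with their priority rank
def pvContainsCats : List (Int × List String) :=
  [(0, pvCorrPats), (1, pvProcPats), (3, pvVisionPats), (4, pvBugPats), (5, pvRefinePats)]
def pvLabels : List String := ["CORR", "PROC", "ASK", "VISION", "BUG", "REFINE", "FEAT"]

-- Python's cl.startswith(pats, i) (tuple form = any pattern matches at i); exact for 0 ≤ i (the scan passes 0 ≤ i < len(cl))
def pvMatchAt (cl : List Char) (i : Int) (pats : List String) : Bool :=
  pats.any (fun p => PySem.Chars.startswith (cl.drop i.toNat) p.toList)

-- Source B's double loop: for i in range(len(cl)): for rank, pats in _CONTAINS_CATS: …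
def pvBestScan (cl : List Char) : Int :=
  (PySem.List.pyRange 0 cl.length 1).foldl
    (fun best i => pvContainsCats.foldl
      (fun b c => if c.1 < b ∧ pvMatchAt cl i c.2 then c.1 else b) best) 6

def classify_prompt_heuristic_alt (content : String) : String :=
  let cl := PySem.Str.lower content
  let best := pvBestScan cl.toList
  let best2 := if 2 < best ∧ (PySem.Str.endswith (PySem.Str.strip cl) "?"
                 || pvAskPats.any (fun p => PySem.Str.startswith cl p)) then 2 else best
  -- _LABELS[best]: the index is always one of 0,1,2,3,4,5,6, so the default is unreachable
  (PySem.List.pyGet? pvLabels best2).getD "FEAT"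

-- ===== PRECONDITION & SPEC =====
def Spec_classify_prompt_heuristic (content : String) (out : String) : Prop := out = classify_prompt_heuristic_alt content
instance (content : String) (out : String) : Decidable (Spec_classify_prompt_heuristic content out) := by unfold Spec_classify_prompt_heuristic; infer_instance

-- ===== CLAIM (what is proved, stated in full; the proofs are below) =====
def Claim_equal_classify_prompt_heuristic : Prop := ∀ (content : String), Dom_classify_prompt_heuristic content → Spec_classify_prompt_heuristic content (classify_prompt_heuristic content)

-- ===== LEMMAS AND PROOFS =====

-- base-min extraction for the min-accumulating foldr
theorem pvFoldr_min_base (m : Int × List String → Bool) (cats : List (Int × List String)) (x b : Int) :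
    cats.foldr (fun c r => if m c then min c.1 r else r) (min x b)
      = min x (cats.foldr (fun c r => if m c then min c.1 r else r) b) := by
  induction cats with
  | nil => rfl
  | cons c cs ih =>
    simp only [List.foldr_cons, ih]
    split_ifs
    · rw [min_left_comm]
    · rfl

-- the left fold with the 'rank < best' guard is the min-accumulating right fold
theorem pvFoldl_eq_foldr (m : Int × List String → Bool) (cats : List (Int × List String)) (b : Int) :
    cats.foldl (fun b c => if c.1 < b ∧ m c then c.1 else b) b
      = cats.foldr (fun c r => if m c then min c.1 r else r) b := by
  induction cats generalizing b with
  | nil => rfl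
  | cons c cs ih =>
    rw [List.foldr_cons, List.foldl_cons, ih]
    have hstep : (if c.1 < b ∧ m c then c.1 else b) = if m c then min c.1 b else b := by
      split_ifs <;> simp_all <;> omega
    rw [hstep]
    split_ifs with h
    · rw [← pvFoldr_min_base m cs c.1 b]
    · rfl

theorem pvFoldr_false (cats : List (Int × List String)) (m : Int × List String → Bool)
    (h : ∀ c ∈ cats, m c = false) (b : Int) :
    cats.foldr (fun c r => if m c then min c.1 r else r) b = b := by
  induction cats with
  | nil => rfl
  | cons c cs ih =>
    simp only [List.foldr_cons, h c (by simp), ih (fun c hc => h c (by simp [hc]))]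
    simp

-- two successive min-folds merge into one fold over the disjunction of the tests
theorem pvFoldr_merge (f g : Int × List String → Bool) (cats : List (Int × List String)) (b : Int) :
    cats.foldr (fun c r => if g c then min c.1 r else r)
      (cats.foldr (fun c r => if f c then min c.1 r else r) b)
      = cats.foldr (fun c r => if f c || g c then min c.1 r else r) b := by
  induction cats generalizing b with
  | nil => rfl
  | cons c cs ih =>
    simp only [List.foldr_cons]
    cases hf : f c <;> cases hg : g c <;>
      simp only [hf, hg, Bool.false_or, Bool.true_or, Bool.or_self, Bool.false_eq_true,
        if_true, if_false, ite_true, ite_false]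
    · exact ih b
    · rw [ih b]
    · rw [pvFoldr_min_base, ih b]
    · rw [pvFoldr_min_base, ih b, ← min_assoc, min_self]

-- the position loop folds to one min-fold tested by matched-anywhere
theorem pvOuter (cl : List Char) (cats : List (Int × List String)) (is : List Int) (b : Int) :
    is.foldl (fun best i => cats.foldl
        (fun b c => if c.1 < b ∧ pvMatchAt cl i c.2 then c.1 else b) best) b
      = cats.foldr (fun c r => if is.any (fun i => pvMatchAt cl i c.2) then min c.1 r else r) b := by
  induction is generalizing b with
  | nil =>
    rw [List.foldl_nil, pvFoldr_false _ _ (fun c _ => by simp)]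
  | cons i is ih =>
    rw [List.foldl_cons, pvFoldl_eq_foldr (fun c => pvMatchAt cl i c.2), ih, pvFoldr_merge]
    simp [List.any_cons]

-- scanning every position of cl for a category of nonempty patterns = substring membership
theorem pvAny_range (cl : List Char) (pats : List String)
    (hne : ∀ p ∈ pats, p.toList ≠ []) :
    ((PySem.List.pyRange 0 cl.length 1).any (fun i => pvMatchAt cl i pats))
      = pats.any (fun p => PySem.Chars.isIn p.toList cl) := by
  refine Bool.eq_iff_iff.mpr ?_
  simp only [pvMatchAt, List.any_eq_true]
  constructor
  · rintro ⟨i, hi, p, hp, hs⟩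
    exact ⟨p, hp, (PySem.Chars.exists_prefix_drop_iff_isIn _ _).mp
      ⟨i.toNat, (PySem.Chars.startswith_iff _ _).mp hs⟩⟩
  · rintro ⟨p, hp, hin⟩
    obtain ⟨j, hj⟩ := (PySem.Chars.exists_prefix_drop_iff_isIn p.toList cl).mpr hin
    have hjlt : j < cl.length := by
      by_contra h
      have : List.drop j cl = [] := List.drop_eq_nil_of_le (by omega)
      rw [this, List.prefix_nil] at hj
      exact hne p hp hj
    refine ⟨(j : Int), ?_, p, hp, ?_⟩
    · rw [PySem.List.mem_pyRange_iff_of_pos (by norm_num)]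
      exact ⟨Int.natCast_nonneg j, by exact_mod_cast hjlt, one_dvd _⟩
    · rw [PySem.Chars.startswith_iff]
      simpa using hj

-- the whole position scan, characterised by the five priority-ordered category tests of A
theorem pvBestScan_eq (cl : String) :
    pvBestScan cl.toList =
      (if pvAnyIn cl pvCorrPats then 0 else if pvAnyIn cl pvProcPats then 1
       else if pvAnyIn cl pvVisionPats then 3 else if pvAnyIn cl pvBugPats then 4
       else if pvAnyIn cl pvRefinePats then 5 else (6 : Int)) := by
  unfold pvBestScan
  rw [pvOuter]
  simp only [pvContainsCats, List.foldr_cons, List.foldr_nil,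
    pvAny_range _ pvCorrPats (by decide), pvAny_range _ pvProcPats (by decide),
    pvAny_range _ pvVisionPats (by decide), pvAny_range _ pvBugPats (by decide),
    pvAny_range _ pvRefinePats (by decide), pvAnyIn, PySem.Str.isIn_eq]
  by_cases h0 : pvCorrPats.any (fun p => PySem.Chars.isIn p.toList cl.toList) <;>
  by_cases h1 : pvProcPats.any (fun p => PySem.Chars.isIn p.toList cl.toList) <;>
  by_cases h3 : pvVisionPats.any (fun p => PySem.Chars.isIn p.toList cl.toList) <;>
  by_cases h4 : pvBugPats.any (fun p => PySem.Chars.isIn p.toList cl.toList) <;>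
  by_cases h5 : pvRefinePats.any (fun p => PySem.Chars.isIn p.toList cl.toList) <;>
    simp only [h0, h1, h3, h4, h5, Bool.false_eq_true, if_true, if_false, ite_true, ite_false] <;>
    norm_num

-- ===== VERDICT (by name: the statement is the Claim_ definition above) =====
set_option maxHeartbeats 1600000 in
theorem classify_prompt_heuristic_spec : Claim_equal_classify_prompt_heuristic := by
  intro content _
  unfold Spec_classify_prompt_heuristic classify_prompt_heuristic classify_prompt_heuristic_alt
  simp only []
  rw [pvBestScan_eq]
  by_cases h0 : pvAnyIn (PySem.Str.lower content) pvCorrPats <;>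
  by_cases h1 : pvAnyIn (PySem.Str.lower content) pvProcPats <;>
  by_cases hE : PySem.Str.endswith (PySem.Str.strip (PySem.Str.lower content)) "?" <;>
  by_cases hS : pvAskPats.any (fun p => PySem.Str.startswith (PySem.Str.lower content) p) <;>
  by_cases h3 : pvAnyIn (PySem.Str.lower content) pvVisionPats <;>
  by_cases h4 : pvAnyIn (PySem.Str.lower content) pvBugPats <;>
  by_cases h5 : pvAnyIn (PySem.Str.lower content) pvRefinePats <;>
    simp only [h0, h1, hE, hS, h3, h4, h5, pvAnyStarts, Bool.false_eq_true, Bool.or_self,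
      Bool.true_or, Bool.or_true, Bool.false_or, Bool.or_false, if_true, if_false,
      ite_true, ite_false] <;>
    norm_num [pvLabels, PySem.List.pyGet?, PySem.List.pyIdx?] <;> rfl
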